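-- pv_equiv track=rewrite | github.com/iiEpic/pySenseAPI | pfsenseapi/utils.py | hex_to_dotted_decimal
-- ===== SOURCE A (Python) =====
-- def hex_to_dotted_decimal(hex_string):
--     """Converts a hexadecimal string to a dotted decimal string (IPv4 format).
--
--         Args:
--             hex_string: The hexadecimal string to convert (e.g., "0A0B0C0D").
--
--         Returns:
--             The dotted decimal string (e.g., "10.11.12.13"), or None if the input is invalid.
--         """
--     if not isinstance(hex_string, str):
--         return None
--
--     hex_string = hex_string.lower()
--     if not all(c in '0123456789abcdef' for c in hex_string):
--         return None
--
--     if len(hex_string) != 8: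
--         return None
--
--     try:
--         decimal_value = int(hex_string, 16)
--     except ValueError:
--         return None
--
--     octet1 = (decimal_value >> 24) & 255
--     octet2 = (decimal_value >> 16) & 255
--     octet3 = (decimal_value >> 8) & 255
--     octet4 = decimal_value & 255
--
--     return f"{octet1}.{octet2}.{octet3}.{octet4}"
-- ===== SOURCE B (Python) =====
-- _HEXVAL = {c: i for i, c in enumerate('0123456789abcdef')}
--
--
-- def hex_to_dotted_decimal(hex_string):
--     """Table-driven conversion: validate, then compute each octet from its own
--     2-character chunk via a digit-value table; never builds one 32-bit integer."""
--     if not isinstance(hex_string, str):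
--         return None
--     s = hex_string.lower()
--     if len(s) != 8 or any(c not in _HEXVAL for c in s):
--         return None
--     octets = [16 * _HEXVAL[s[i]] + _HEXVAL[s[i + 1]] for i in range(0, 8, 2)]
--     return '.'.join(str(o) for o in octets)
-- ===== Notes on version B (the rewrite author's own statement) =====
-- stated objective: alternative
-- what changed: Instead of parsing the whole 8-digit string into one 32-bit integer with int(s,16) and extracting octets by shifting and masking, B converts octet-by-octet: each character's value comes from a precomputed digit-value table and each octet is 16*hi+lo of its own 2-character chunk.
import Mathlib
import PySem

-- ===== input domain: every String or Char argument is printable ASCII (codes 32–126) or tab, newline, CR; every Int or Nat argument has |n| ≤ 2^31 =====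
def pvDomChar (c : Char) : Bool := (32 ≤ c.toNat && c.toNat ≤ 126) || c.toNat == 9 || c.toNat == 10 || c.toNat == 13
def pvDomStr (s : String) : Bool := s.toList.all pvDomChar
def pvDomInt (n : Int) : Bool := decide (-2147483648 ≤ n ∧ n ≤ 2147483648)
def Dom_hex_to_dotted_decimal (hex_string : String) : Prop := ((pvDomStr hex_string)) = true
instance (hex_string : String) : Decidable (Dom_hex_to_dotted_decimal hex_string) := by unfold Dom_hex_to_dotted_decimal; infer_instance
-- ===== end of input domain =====

-- B converts octet-by-octet with a digit-value table instead of building one 32-bit integer and shifting; same validation, same results.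

-- ===== PORT A =====
-- the string constant '0123456789abcdef'
def pvHexDigits : List Char :=
  ['0','1','2','3','4','5','6','7','8','9','a','b','c','d','e','f']

-- hand port of the value of one hex digit as int(·,16) reads it; exact on the
-- 16 lowercase hex-digit characters, the only characters it is applied to
-- (A calls int only after its all-hex check has passed)
def pvHexValA (c : Char) : Int :=
  if c = '0' then 0 else if c = '1' then 1 else if c = '2' then 2
  else if c = '3' then 3 else if c = '4' then 4 else if c = '5' then 5
  else if c = '6' then 6 else if c = '7' then 7 else if c = '8' then 8
  else if c = '9' then 9 else if c = 'a' then 10 else if c = 'b' then 11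
  else if c = 'c' then 12 else if c = 'd' then 13 else if c = 'e' then 14
  else 15

-- hand port of int(s, 16), exact on nonempty strings of lowercase hex digits —
-- the only strings A ever passes to it (validation precedes the call, so the
-- ValueError branch of A's try/except is unreachable and ports to nothing)
def pvParseHex16 (cs : List Char) : Int :=
  cs.foldl (fun a c => 16 * a + pvHexValA c) 0

-- literal port of A: isinstance(·, str) is always true for a String argument;
-- the f-string is ported as code-point-level concatenation (exact)
def hex_to_dotted_decimal (hex_string : String) : Option String :=
  let s := PySem.Str.lower hex_string
  if ¬ (s.toList.all (fun c => decide (c ∈ pvHexDigits))) then none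
  else if s.toList.length ≠ 8 then none
  else
    let v := pvParseHex16 s.toList
    let o1 := PySem.Int.band (v >>> (24 : Nat)) 255
    let o2 := PySem.Int.band (v >>> (16 : Nat)) 255
    let o3 := PySem.Int.band (v >>> (8 : Nat)) 255
    let o4 := PySem.Int.band v 255
    some (String.ofList (PySem.Int.toChars o1 ++ '.' :: PySem.Int.toChars o2 ++
      '.' :: PySem.Int.toChars o3 ++ '.' :: PySem.Int.toChars o4))

-- ===== PORT B =====
-- _HEXVAL = {c: i for i, c in enumerate('0123456789abcdef')}
def pvHexDict : PySem.Dict Char Int :=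
  (PySem.List.enumerate "0123456789abcdef".toList 0).foldl
    (fun d p => d.insert p.2 p.1) PySem.Dict.empty

-- literal port of B; after validation _HEXVAL[s[i]] cannot raise KeyError and
-- s[i] is in range, so the lookup and the index are ported with their total
-- getD forms (the defaults are never used)
def hex_to_dotted_decimal_alt (hex_string : String) : Option String :=
  let s := PySem.Str.lower hex_string
  if s.toList.length ≠ 8 ∨ s.toList.any (fun c => !(pvHexDict.contains c)) then none
  else
    let octets := (PySem.List.pyRange 0 8 2).map (fun i =>
      16 * pvHexDict.getD (PySem.List.pyGetD s.toList i ' ') 0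
        + pvHexDict.getD (PySem.List.pyGetD s.toList (i + 1) ' ') 0)
    some (PySem.Str.join "." (octets.map PySem.Int.toStr))

-- ===== PRECONDITION & SPEC =====
def Spec_hex_to_dotted_decimal (hex_string : String) (out : Option String) : Prop := out = hex_to_dotted_decimal_alt hex_string
instance (hex_string : String) (out : Option String) : Decidable (Spec_hex_to_dotted_decimal hex_string out) := by unfold Spec_hex_to_dotted_decimal; infer_instance

-- ===== CLAIM (what is proved, stated in full; the proofs are below) =====
def Claim_equal_hex_to_dotted_decimal : Prop := ∀ (hex_string : String), Dom_hex_to_dotted_decimal hex_string → Spec_hex_to_dotted_decimal hex_string (hex_to_dotted_decimal hex_string)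

-- ===== LEMMAS AND PROOFS =====

theorem hexDict_eq : pvHexDict = PySem.Dict.mk
    [('0',0),('1',1),('2',2),('3',3),('4',4),('5',5),('6',6),('7',7),
     ('8',8),('9',9),('a',10),('b',11),('c',12),('d',13),('e',14),('f',15)] := by
  decide

theorem hex_contains (c : Char) :
    pvHexDict.contains c = decide (c ∈ pvHexDigits) := by
  rw [hexDict_eq]
  simp [pvHexDigits, PySem.Dict.contains, Bool.beq_eq_decide_eq, eq_comm]

theorem hex_getD (c : Char) (h : c ∈ pvHexDigits) :
    pvHexDict.getD c 0 = pvHexValA c ∧ 0 ≤ pvHexValA c ∧ pvHexValA c < 16 := by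
  fin_cases h <;> exact ⟨by rw [hexDict_eq]; rfl, by decide, by decide⟩

theorem any_not_contains (cs : List Char) :
    (cs.any fun c => !pvHexDict.contains c) = !(cs.all fun c => decide (c ∈ pvHexDigits)) := by
  simp only [hex_contains]
  induction cs with
  | nil => rfl
  | cons c cs ih => simp [List.any_cons, List.all_cons, ih, Bool.not_and]

theorem octet_band (v : Int) (hv : 0 ≤ v) (k : Nat) :
    PySem.Int.band (v >>> k) 255 = (v / 2 ^ k) % 256 := by
  rw [Int.shiftRight_eq_div_pow]
  push_cast
  have h2 : (0:Int) ≤ v / 2 ^ k := Int.ediv_nonneg hv (by positivity)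
  rw [PySem.Int.band_of_nonneg h2 (by norm_num)]
  have ht : Int.toNat 255 = 255 := rfl
  rw [ht, Nat.and_two_pow_sub_one_eq_mod (v / 2 ^ k).toNat 8]
  omega

theorem octet_band0 (v : Int) (hv : 0 ≤ v) :
    PySem.Int.band v 255 = v % 256 := by
  have h := octet_band v hv 0
  simpa using h

theorem join_four (a b c d : Int) :
    String.ofList (PySem.Int.toChars a ++ '.' :: PySem.Int.toChars b ++ '.' ::
        PySem.Int.toChars c ++ '.' :: PySem.Int.toChars d)
      = PySem.Str.join "." ([a, b, c, d].map PySem.Int.toStr) := by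
  rw [← String.toList_inj]
  simp [PySem.Str.toList_join, PySem.Int.toList_toStr, PySem.Chars.join_cons_cons,
    PySem.Chars.join_singleton]

theorem eight_of_length {α : Type} (l : List α) (h : l.length = 8) :
    ∃ a b c d e f g k, l = [a, b, c, d, e, f, g, k] := by
  match l with
  | [a,b,c,d,e,f,g,k] => exact ⟨a,b,c,d,e,f,g,k, rfl⟩
  | [] | [_] | [_,_] | [_,_,_] | [_,_,_,_] | [_,_,_,_,_] | [_,_,_,_,_,_]
  | [_,_,_,_,_,_,_] => simp at h
  | _::_::_::_::_::_::_::_::_::_ => simp at h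

theorem parse_octets (a1 a2 a3 a4 a5 a6 a7 a8 v : Int)
    (b1 : 0 ≤ a1) (u1 : a1 < 16) (b2 : 0 ≤ a2) (u2 : a2 < 16)
    (b3 : 0 ≤ a3) (u3 : a3 < 16) (b4 : 0 ≤ a4) (u4 : a4 < 16)
    (b5 : 0 ≤ a5) (u5 : a5 < 16) (b6 : 0 ≤ a6) (u6 : a6 < 16)
    (b7 : 0 ≤ a7) (u7 : a7 < 16) (b8 : 0 ≤ a8) (u8 : a8 < 16)
    (hv : v = 16*(16*(16*(16*(16*(16*(16*(16*0+a1)+a2)+a3)+a4)+a5)+a6)+a7)+a8) :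
    PySem.Int.band (v >>> (24:Nat)) 255 = 16*a1+a2 ∧
    PySem.Int.band (v >>> (16:Nat)) 255 = 16*a3+a4 ∧
    PySem.Int.band (v >>> (8:Nat)) 255 = 16*a5+a6 ∧
    PySem.Int.band v 255 = 16*a7+a8 := by
  have hnn : 0 ≤ v := by omega
  have p24 : (2:Int) ^ (24:Nat) = 16777216 := by norm_num
  have p16 : (2:Int) ^ (16:Nat) = 65536 := by norm_num
  have p8 : (2:Int) ^ (8:Nat) = 256 := by norm_num
  refine ⟨?_, ?_, ?_, ?_⟩
  · rw [octet_band v hnn 24, p24]; omega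
  · rw [octet_band v hnn 16, p16]; omega
  · rw [octet_band v hnn 8, p8]; omega
  · rw [octet_band0 v hnn]; omega

-- ===== VERDICT (by name: the statement is the Claim_ definition above) =====
theorem hex_to_dotted_decimal_spec : Claim_equal_hex_to_dotted_decimal := by
  intro s _
  unfold Spec_hex_to_dotted_decimal hex_to_dotted_decimal hex_to_dotted_decimal_alt
  dsimp only
  split_ifs with h1 h2 h3 h4 h5
  · rfl
  · exact absurd (Or.inl h2) h3
  · -- A accepts, B's condition claims failure: impossible
    rcases h4 with h | h
    · exact h2 h
    · rw [any_not_contains, h1] at h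
      simp at h
  · -- main case: 8 hex digits
    have hlen : (PySem.Str.lower s).toList.length = 8 := not_ne_iff.mp h2
    obtain ⟨c1, c2, c3, c4, c5, c6, c7, c8, hc⟩ := eight_of_length _ hlen
    rw [hc] at h1 ⊢
    simp only [List.all_cons, List.all_nil, Bool.and_eq_true, decide_eq_true_eq, and_true] at h1
    obtain ⟨m1, m2, m3, m4, m5, m6, m7, m8⟩ := h1
    obtain ⟨g1, lo1, u1⟩ := hex_getD c1 m1
    obtain ⟨g2, lo2, u2⟩ := hex_getD c2 m2
    obtain ⟨g3, lo3, u3⟩ := hex_getD c3 m3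
    obtain ⟨g4, lo4, u4⟩ := hex_getD c4 m4
    obtain ⟨g5, lo5, u5⟩ := hex_getD c5 m5
    obtain ⟨g6, lo6, u6⟩ := hex_getD c6 m6
    obtain ⟨g7, lo7, u7⟩ := hex_getD c7 m7
    obtain ⟨g8, lo8, u8⟩ := hex_getD c8 m8
    have hr : PySem.List.pyRange 0 8 2 = [0, 2, 4, 6] := by decide
    rw [hr]
    simp only [List.map]
    have e1 : PySem.List.pyGetD [c1,c2,c3,c4,c5,c6,c7,c8] (0:Int) ' ' = c1 := rfl
    have e2 : PySem.List.pyGetD [c1,c2,c3,c4,c5,c6,c7,c8] ((0:Int)+1) ' ' = c2 := rfl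
    have e3 : PySem.List.pyGetD [c1,c2,c3,c4,c5,c6,c7,c8] (2:Int) ' ' = c3 := rfl
    have e4 : PySem.List.pyGetD [c1,c2,c3,c4,c5,c6,c7,c8] ((2:Int)+1) ' ' = c4 := rfl
    have e5 : PySem.List.pyGetD [c1,c2,c3,c4,c5,c6,c7,c8] (4:Int) ' ' = c5 := rfl
    have e6 : PySem.List.pyGetD [c1,c2,c3,c4,c5,c6,c7,c8] ((4:Int)+1) ' ' = c6 := rfl
    have e7 : PySem.List.pyGetD [c1,c2,c3,c4,c5,c6,c7,c8] (6:Int) ' ' = c7 := rfl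
    have e8 : PySem.List.pyGetD [c1,c2,c3,c4,c5,c6,c7,c8] ((6:Int)+1) ' ' = c8 := rfl
    rw [e1, e2, e3, e4, e5, e6, e7, e8, g1, g2, g3, g4, g5, g6, g7, g8]
    simp only [pvParseHex16, List.foldl]
    obtain ⟨o1, o2, o3, o4⟩ := parse_octets (pvHexValA c1) (pvHexValA c2) (pvHexValA c3)
      (pvHexValA c4) (pvHexValA c5) (pvHexValA c6) (pvHexValA c7) (pvHexValA c8) _
      lo1 u1 lo2 u2 lo3 u3 lo4 u4 lo5 u5 lo6 u6 lo7 u7 lo8 u8 rfl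
    rw [o1, o2, o3, o4, join_four]
    simp only [List.map]
  · rfl
  · -- B accepts, A's all-check claims failure: impossible
    rcases not_or.mp h5 with ⟨-, hany⟩
    cases hall : ((PySem.Str.lower s).toList.all fun c => decide (c ∈ pvHexDigits)) with
    | true => exact h1 hall
    | false => rw [any_not_contains, hall] at hany; exact hany rfl
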